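-- pv_equiv track=rewrite | github.com/lableadmanager-bit/lableadspro-website | scripts/import-apollo-contacts.py | find_csv_field
-- ===== SOURCE A (Python) =====
-- def find_csv_field(row: dict, candidates: list[str]) -> str:
--     """Find a value from a row trying multiple possible column names."""
--     for key in candidates:
--         for row_key in row:
--             if row_key.strip().lower() == key.lower():
--                 val = row[row_key].strip()
--                 if val:
--                     return val
--     return ""
-- ===== SOURCE B (Python) =====
-- def find_csv_field(row: dict, candidates: list[str]) -> str:
--     """Find a value from a row trying multiple possible column names."""
--     rank = {}
--     for i, key in enumerate(candidates):
--         rank.setdefault(key.lower(), i)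
--     best_rank, best_val = len(candidates), ""
--     for row_key in row:
--         if best_rank == 0:
--             break
--         r = rank.get(row_key.strip().lower())
--         if r is not None and r < best_rank:
--             val = row[row_key].strip()
--             if val:
--                 best_rank, best_val = r, val
--     return best_val
-- ===== Notes on version B (the rewrite author's own statement) =====
-- stated objective: alternative
-- what changed: B inverts the search: instead of A's nested loop over candidates then row keys, it builds a candidate-name-to-rank dict once, then makes a single pass over the row keeping the non-empty value with the smallest candidate rank (with an early exit once rank 0 is found); the result is the lexicographic minimum over (candidate index, row position) either way.
import Mathlib
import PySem

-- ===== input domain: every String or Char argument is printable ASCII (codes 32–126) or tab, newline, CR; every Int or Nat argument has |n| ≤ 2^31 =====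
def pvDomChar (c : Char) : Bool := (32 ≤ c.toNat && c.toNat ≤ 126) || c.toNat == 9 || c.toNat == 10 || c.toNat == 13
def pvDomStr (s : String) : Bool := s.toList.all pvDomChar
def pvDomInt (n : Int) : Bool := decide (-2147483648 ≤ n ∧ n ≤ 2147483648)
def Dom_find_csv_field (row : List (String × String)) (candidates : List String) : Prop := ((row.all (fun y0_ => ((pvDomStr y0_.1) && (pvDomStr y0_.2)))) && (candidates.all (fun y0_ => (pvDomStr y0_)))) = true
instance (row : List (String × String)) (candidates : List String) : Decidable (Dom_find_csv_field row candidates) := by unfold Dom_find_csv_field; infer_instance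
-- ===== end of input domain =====

-- B inverts the search: one pass over the row keeping the match with the smallest candidate
-- rank (looked up in a dict built once from the candidates, with an early exit at rank 0),
-- instead of A's nested candidate-then-row loops.


-- 'row_key.strip().lower()', used by both ports
def pvNorm (s : String) : String := PySem.Str.lower (PySem.Str.strip s)

-- ===== PORT A =====
-- inner loop: 'for row_key in row: …' (row_key drawn from the dict's keys; row[row_key]
-- is ported as getD with default "" — the key comes from d.keys so the lookup never misses)
def findA_inner (d : PySem.Dict String String) (kl : String) : List String → Option String
  | [] => none
  | rk :: rest =>
    if pvNorm rk == kl then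
      let val := PySem.Str.strip (d.getD rk "")
      if val ≠ "" then some val else findA_inner d kl rest
    else findA_inner d kl rest

-- outer loop: 'for key in candidates: …'
def findA_outer (d : PySem.Dict String String) : List String → String
  | [] => ""
  | key :: rest =>
    match findA_inner d (PySem.Str.lower key) d.keys with
    | some v => v
    | none => findA_outer d rest

def find_csv_field (row : List (String × String)) (candidates : List String) : String :=
  findA_outer (PySem.Dict.ofList row) candidates

-- ===== PORT B =====
-- 'for i, key in enumerate(candidates): rank.setdefault(key.lower(), i)'
def rankFold (candidates : List String) : PySem.Dict String Int :=
  (PySem.List.enumerate candidates 0).foldl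
    (fun d p =>
      if d.contains (PySem.Str.lower p.2) then d else d.insert (PySem.Str.lower p.2) p.1)
    PySem.Dict.empty

-- 'for row_key in row: if best_rank == 0: break; r = rank.get(...); if r is not None and r < best_rank: …'
def findB_loop (d : PySem.Dict String String) (rank : PySem.Dict String Int) :
    List String → Int × String → Int × String
  | [], best => best
  | rk :: rest, best =>
    if best.1 = 0 then best
    else
      match rank.get? (pvNorm rk) with
      | none => findB_loop d rank rest best
      | some r =>
        if r < best.1 then
          let val := PySem.Str.strip (d.getD rk "")
          if val ≠ "" then findB_loop d rank rest (r, val)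
          else findB_loop d rank rest best
        else findB_loop d rank rest best

def find_csv_field_alt (row : List (String × String)) (candidates : List String) : String :=
  let d := PySem.Dict.ofList row
  let rank := rankFold candidates
  (findB_loop d rank d.keys ((candidates.length : Int), "")).2

-- ===== PRECONDITION & SPEC =====
def Spec_find_csv_field (row : List (String × String)) (candidates : List String) (out : String) : Prop := out = find_csv_field_alt row candidates
instance (row : List (String × String)) (candidates : List String) (out : String) : Decidable (Spec_find_csv_field row candidates out) := by unfold Spec_find_csv_field; infer_instance

-- ===== CLAIM (what is proved, stated in full; the proofs are below) =====
def Claim_equal_find_csv_field : Prop := ∀ (row : List (String × String)) (candidates : List String), Dom_find_csv_field row candidates → Spec_find_csv_field row candidates (find_csv_field row candidates)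

-- ===== LEMMAS AND PROOFS =====

-- pure (pair-list) versions of the two loops, and the filtered match list both reduce to

def scanA (kl : String) : List (String × String) → Option String
  | [] => none
  | p :: rest =>
    if pvNorm p.1 = kl then
      if PySem.Str.strip p.2 ≠ "" then some (PySem.Str.strip p.2) else scanA kl rest
    else scanA kl rest

def runA (ps : List (String × String)) : List String → String
  | [] => ""
  | c :: rest =>
    match scanA (PySem.Str.lower c) ps with
    | some v => v
    | none => runA ps rest

def scanB (norm : List String) : List (String × String) → Nat × String → Nat × String
  | [], best => best
  | p :: rest, best =>
    if best.1 = 0 then best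
    else
      match PySem.List.index? norm (pvNorm p.1) with
      | none => scanB norm rest best
      | some r =>
        if r < best.1 then
          if PySem.Str.strip p.2 ≠ "" then scanB norm rest (r, PySem.Str.strip p.2)
          else scanB norm rest best
        else scanB norm rest best

def Lmap (norm : List String) : List (String × String) → List (Nat × String)
  | [] => []
  | p :: rest =>
    match PySem.List.index? norm (pvNorm p.1) with
    | some r =>
      if PySem.Str.strip p.2 ≠ "" then (r, PySem.Str.strip p.2) :: Lmap norm rest
      else Lmap norm rest
    | none => Lmap norm rest

def bestOf : Nat × String → List (Nat × String) → Nat × String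
  | b, [] => b
  | b, e :: rest => bestOf (if e.1 < b.1 then e else b) rest

theorem bestOf_cons (b e : Nat × String) (l : List (Nat × String)) :
    bestOf b (e :: l) = bestOf (if e.1 < b.1 then e else b) l := rfl

theorem bestOf_fst_zero (b : Nat × String) (l : List (Nat × String)) (h : b.1 = 0) :
    bestOf b l = b := by
  induction l with
  | nil => rfl
  | cons e rest ih => rw [bestOf_cons, if_neg (by omega), ih]

theorem findA_inner_eq (d : PySem.Dict String String) (kl : String)
    (ps : List (String × String)) (h : ∀ p ∈ ps, d.getD p.1 "" = p.2) :
    findA_inner d kl (ps.map (·.1)) = scanA kl ps := by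
  induction ps with
  | nil => rfl
  | cons p rest ih =>
    have hp : d.getD p.1 "" = p.2 := h p (by simp)
    have hrest : ∀ q ∈ rest, d.getD q.1 "" = q.2 := fun q hq => h q (by simp [hq])
    by_cases hk : pvNorm p.1 = kl
    · simp only [List.map_cons, findA_inner, scanA, hk, beq_self_eq_true, if_true, hp, ih hrest]
    · simp only [List.map_cons, findA_inner, scanA,
        show (pvNorm p.1 == kl) = false by simp [hk], Bool.false_eq_true, if_false,
        if_neg hk, ih hrest]

theorem rankFold_get_aux (s : String) (cands : List String) (m : Int)
    (d : PySem.Dict String Int) :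
    ((PySem.List.enumerate cands m).foldl
        (fun d p =>
          if d.contains (PySem.Str.lower p.2) then d
          else d.insert (PySem.Str.lower p.2) p.1) d).get? s =
      (d.get? s).or
        ((PySem.List.index? (cands.map PySem.Str.lower) s).map (fun k : Nat => m + k)) := by
  induction cands generalizing m d with
  | nil => simp [PySem.List.enumerate_nil]
  | cons c cs ih =>
    rw [PySem.List.enumerate_cons, List.foldl_cons, ih]
    by_cases hs : PySem.Str.lower c = s
    · have hidx : PySem.List.index? (List.map PySem.Str.lower (c :: cs)) s = some 0 := by
        rw [List.map_cons, hs]; exact PySem.List.index?_cons_self s (cs.map PySem.Str.lower)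
      rw [hidx]
      by_cases hc : d.contains (PySem.Str.lower c) = true
      · rw [if_pos hc]
        have hne : d.get? s ≠ none := fun h0 => by
          rw [PySem.Dict.get?_eq_none_iff_contains, ← hs] at h0
          rw [h0] at hc; cases hc
        obtain ⟨v, hv⟩ := Option.ne_none_iff_exists'.mp hne
        simp [hv]
      · rw [if_neg hc, hs]
        have h0 : d.get? s = none := by
          rw [PySem.Dict.get?_eq_none_iff_contains]
          rw [hs] at hc; simpa using hc
        simp [h0, PySem.Dict.get?_insert_self]
    · have hidx : PySem.List.index? (List.map PySem.Str.lower (c :: cs)) s =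
          (PySem.List.index? (cs.map PySem.Str.lower) s).map (· + 1) := by
        rw [List.map_cons]
        exact PySem.List.index?_cons_of_ne (cs.map PySem.Str.lower) hs
      rw [hidx]
      have hd' : (if d.contains (PySem.Str.lower c) then d
          else d.insert (PySem.Str.lower c) m).get? s = d.get? s := by
        by_cases hc : d.contains (PySem.Str.lower c) = true
        · rw [if_pos hc]
        · rw [if_neg hc]
          exact PySem.Dict.get?_insert_of_ne d m (fun he => hs he.symm)
      rw [hd']
      cases PySem.List.index? (cs.map PySem.Str.lower) s with
      | none => rfl
      | some k =>
        simp only [Option.map_some]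
        have : m + 1 + (k : Int) = m + ((k + 1 : Nat) : Int) := by push_cast; ring
        rw [this]

theorem rankFold_get (cands : List String) (s : String) :
    (rankFold cands).get? s =
      (PySem.List.index? (cands.map PySem.Str.lower) s).map (fun k : Nat => (k : Int)) := by
  rw [rankFold, rankFold_get_aux]
  cases PySem.List.index? (cands.map PySem.Str.lower) s with
  | none => rfl
  | some k => simp

theorem findB_loop_eq (d : PySem.Dict String String) (cands : List String)
    (ps : List (String × String)) (h : ∀ p ∈ ps, d.getD p.1 "" = p.2) (b : Nat × String) :
    findB_loop d (rankFold cands) (ps.map (·.1)) ((b.1 : Int), b.2) =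
      (((scanB (cands.map PySem.Str.lower) ps b).1 : Int),
        (scanB (cands.map PySem.Str.lower) ps b).2) := by
  induction ps generalizing b with
  | nil => rfl
  | cons p rest ih =>
    have hp : d.getD p.1 "" = p.2 := h p (by simp)
    have hrest : ∀ q ∈ rest, d.getD q.1 "" = q.2 := fun q hq => h q (by simp [hq])
    simp only [List.map_cons, findB_loop, scanB, hp]
    by_cases h0 : b.1 = 0
    · rw [if_pos (show ((b.1 : Nat) : Int) = 0 by exact_mod_cast h0), if_pos h0]
    · rw [if_neg (show ¬((b.1 : Nat) : Int) = 0 by exact_mod_cast h0), if_neg h0,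
        rankFold_get]
      cases hidx : PySem.List.index? (cands.map PySem.Str.lower) (pvNorm p.1) with
      | none => simp only [Option.map_none]; exact ih hrest b
      | some r =>
        simp only [Option.map_some]
        by_cases hr : r < b.1
        · rw [if_pos (show ((r : Nat) : Int) < ((b.1 : Nat) : Int) by exact_mod_cast hr),
            if_pos hr]
          by_cases hv : PySem.Str.strip p.2 ≠ ""
          · rw [if_pos hv, if_pos hv]
            exact ih hrest (r, PySem.Str.strip p.2)
          · rw [if_neg hv, if_neg hv]
            exact ih hrest b
        · rw [if_neg (show ¬((r : Nat) : Int) < ((b.1 : Nat) : Int) by exact_mod_cast hr),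
            if_neg hr]
          exact ih hrest b

theorem scanB_eq_bestOf (norm : List String) (ps : List (String × String)) (b : Nat × String) :
    scanB norm ps b = bestOf b (Lmap norm ps) := by
  induction ps generalizing b with
  | nil => rfl
  | cons p rest ih =>
    by_cases h0 : b.1 = 0
    · rw [show scanB norm (p :: rest) b = if b.1 = 0 then b else _ from rfl, if_pos h0,
        bestOf_fst_zero b _ h0]
    · cases hidx : PySem.List.index? norm (pvNorm p.1) with
      | none => simp only [scanB, Lmap, hidx, if_neg h0]; exact ih b
      | some r =>
        simp only [scanB, Lmap, hidx, if_neg h0]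
        by_cases hv : PySem.Str.strip p.2 ≠ ""
        · rw [if_pos hv, if_pos hv, bestOf_cons]
          by_cases hr : r < b.1
          · rw [if_pos hr, ih]; simp [hr]
          · rw [if_neg hr, ih]; simp [hr]
        · rw [if_neg hv, ite_self, ih, if_neg hv]

-- once the best has rank 0 it never changes
theorem bestOf_zero (v : String) (l : List (Nat × String)) : bestOf (0, v) l = (0, v) := by
  induction l with
  | nil => rfl
  | cons e rest ih => simpa [bestOf, Nat.not_lt_zero] using ih

-- adding 1 to every rank (and the sentinel) commutes with the selection
theorem bestOf_shift (b : Nat × String) (l : List (Nat × String)) :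
    bestOf (b.1 + 1, b.2) (l.map (fun e => (e.1 + 1, e.2))) =
      ((bestOf b l).1 + 1, (bestOf b l).2) := by
  induction l generalizing b with
  | nil => rfl
  | cons e rest ih =>
    simp only [List.map_cons, bestOf]
    by_cases hr : e.1 < b.1
    · simpa [hr, Nat.add_lt_add_iff_right] using ih e
    · simpa [hr, Nat.add_lt_add_iff_right] using ih b

-- if a match for the head candidate exists, the selection returns its first value
theorem bestOf_of_scanA_some (lowc : String) (norm' : List String)
    (ps : List (String × String)) (v : String) (b : Nat × String)
    (hb : 1 ≤ b.1) (h : scanA lowc ps = some v) :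
    bestOf b (Lmap (lowc :: norm') ps) = (0, v) := by
  induction ps generalizing b with
  | nil => simp [scanA] at h
  | cons p rest ih =>
    by_cases hk : pvNorm p.1 = lowc
    · have hidx : PySem.List.index? (lowc :: norm') (pvNorm p.1) = some 0 := by
        rw [hk]; exact PySem.List.index?_cons_self lowc norm'
      by_cases hv : PySem.Str.strip p.2 ≠ ""
      · rw [scanA, if_pos hk, if_pos hv] at h
        obtain rfl : PySem.Str.strip p.2 = v := Option.some.inj h
        simp only [Lmap, hidx, if_pos hv]
        rw [bestOf_cons,
          if_pos (show ((0, PySem.Str.strip p.2) : Nat × String).1 < b.1 from hb)]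
        exact bestOf_zero _ _
      · rw [scanA, if_pos hk, if_neg hv] at h
        simp only [Lmap, hidx, if_neg hv]
        exact ih b hb h
    · have hidx : PySem.List.index? (lowc :: norm') (pvNorm p.1) =
          (PySem.List.index? norm' (pvNorm p.1)).map (· + 1) :=
        PySem.List.index?_cons_of_ne norm' (fun he => hk he.symm)
      rw [scanA, if_neg hk] at h
      simp only [Lmap, hidx]
      cases hidx' : PySem.List.index? norm' (pvNorm p.1) with
      | none => simp only [Option.map_none]; exact ih b hb h
      | some r =>
        simp only [Option.map_some]
        by_cases hv : PySem.Str.strip p.2 ≠ ""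
        · rw [if_pos hv, bestOf_cons]
          by_cases hr : r + 1 < b.1
          · rw [if_pos
              (show ((r + 1, PySem.Str.strip p.2) : Nat × String).1 < b.1 from hr)]
            exact ih _ (Nat.succ_le_succ (Nat.zero_le r)) h
          · rw [if_neg
              (show ¬((r + 1, PySem.Str.strip p.2) : Nat × String).1 < b.1 from hr)]
            exact ih b hb h
        · rw [if_neg hv]
          exact ih b hb h

-- if the head candidate has no match, the filtered list is a rank-shift of the tail's
theorem Lmap_shift (lowc : String) (norm' : List String)
    (ps : List (String × String)) (h : scanA lowc ps = none) :
    Lmap (lowc :: norm') ps = (Lmap norm' ps).map (fun e => (e.1 + 1, e.2)) := by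
  induction ps with
  | nil => rfl
  | cons p rest ih =>
    by_cases hk : pvNorm p.1 = lowc
    · have hidx : PySem.List.index? (lowc :: norm') (pvNorm p.1) = some 0 := by
        rw [hk]; exact PySem.List.index?_cons_self lowc norm'
      by_cases hv : PySem.Str.strip p.2 ≠ ""
      · rw [scanA, if_pos hk, if_pos hv] at h
        exact absurd h (by simp)
      · rw [scanA, if_pos hk, if_neg hv] at h
        simp only [Lmap, hidx, if_neg hv]
        cases hidx' : PySem.List.index? norm' (pvNorm p.1) with
        | none => exact ih h
        | some r => exact ih h
    · have hidx : PySem.List.index? (lowc :: norm') (pvNorm p.1) =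
          (PySem.List.index? norm' (pvNorm p.1)).map (· + 1) :=
        PySem.List.index?_cons_of_ne norm' (fun he => hk he.symm)
      rw [scanA, if_neg hk] at h
      simp only [Lmap, hidx]
      cases hidx' : PySem.List.index? norm' (pvNorm p.1) with
      | none => simp only [Option.map_none]; exact ih h
      | some r =>
        simp only [Option.map_some]
        by_cases hv : PySem.Str.strip p.2 ≠ ""
        · rw [if_pos hv, if_pos hv, List.map_cons, ih h]
        · rw [if_neg hv, if_neg hv]
          exact ih h

theorem runA_eq_bestOf (ps : List (String × String)) (cands : List String) :
    runA ps cands = (bestOf (cands.length, "") (Lmap (cands.map PySem.Str.lower) ps)).2 := by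
  induction cands with
  | nil =>
    have hL : Lmap [] ps = [] := by
      induction ps with
      | nil => rfl
      | cons p rest ih =>
        have : PySem.List.index? ([] : List String) (pvNorm p.1) = none :=
          (PySem.List.index?_eq_none_iff _ _).mpr (by simp)
        simp only [Lmap, this, ih]
    simp [runA, hL, bestOf]
  | cons c rest ih =>
    simp only [runA, List.map_cons]
    cases hs : scanA (PySem.Str.lower c) ps with
    | some v =>
      rw [bestOf_of_scanA_some (PySem.Str.lower c) (rest.map PySem.Str.lower) ps v _
        (by simp) hs]
    | none =>
      rw [Lmap_shift (PySem.Str.lower c) (rest.map PySem.Str.lower) ps hs]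
      simp only [List.length_cons]
      rw [show (rest.length + 1, ("" : String)) = ((rest.length, ("" : String)).1 + 1, (rest.length, ("" : String)).2) from rfl,
        bestOf_shift, ih]

theorem find_csv_field_eq_alt (row : List (String × String)) (candidates : List String) :
    find_csv_field row candidates = find_csv_field_alt row candidates := by
  show findA_outer (PySem.Dict.ofList row) candidates =
    (findB_loop (PySem.Dict.ofList row) (rankFold candidates)
      (PySem.Dict.ofList row).keys ((candidates.length : Int), "")).2
  set d := PySem.Dict.ofList row with hd
  have hrec : ∀ p ∈ d.items, d.getD p.1 "" = p.2 := fun p hp => by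
    obtain ⟨k, v⟩ := p
    exact PySem.Dict.getD_of_mem_items _ hp (hd ▸ PySem.Dict.nodup_keys_ofList row) ""
  have hkeys : d.keys = d.items.map (·.1) := rfl
  rw [hkeys,
    show ((candidates.length : Int), ("" : String)) =
      (((candidates.length, ("" : String)).1 : Int), (candidates.length, ("" : String)).2)
      from rfl,
    findB_loop_eq d candidates d.items hrec (candidates.length, ""), scanB_eq_bestOf,
    ← runA_eq_bestOf]
  induction candidates with
  | nil => rfl
  | cons c rest ih =>
    simp only [findA_outer, runA, hkeys, findA_inner_eq d _ d.items hrec]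
    cases scanA (PySem.Str.lower c) d.items with
    | some v => rfl
    | none => exact ih

-- ===== VERDICT (by name: the statement is the Claim_ definition above) =====
theorem find_csv_field_spec : Claim_equal_find_csv_field := by
  intro row candidates _
  exact find_csv_field_eq_alt row candidates
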